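-- pv_equiv track=rewrite | github.com/JudicaelPoumay/Complex-Term-Extraction | main.py | removeSubGram
-- ===== SOURCE A (Python) =====
-- def removeSubGram(sns, ng2, ng3, ng4):
--     ToDel2 = []
--     ToDel3 = []
--     ToDel4 = []
--     for sn in sns:
--         for ng in ng2:
--             if(ng in sn):
--                 ToDel2.append(ng)
--         for ng in ng3:
--             if(ng in sn):
--                 ToDel3.append(ng)
--         for ng in ng4:
--             if(ng in sn):
--                 ToDel4.append(ng)
--     for ng in ToDel2:
--         if(ng in ng2):
--             ng2.remove(ng)
--     for ng in ToDel3: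
--         if(ng in ng3):
--             ng3.remove(ng)
--     for ng in ToDel4:
--         if(ng in ng4):
--             ng4.remove(ng)
--     return sns, ng2, ng3, ng4
-- ===== SOURCE B (Python) =====
-- def removeSubGram(sns, ng2, ng3, ng4):
--     # Equivalence is about the RETURN value: A mutates ng2/ng3/ng4 in place, B builds new lists.
--     def survives(ng):
--         return not any(ng in sn for sn in sns)
--     return (sns,
--             [ng for ng in ng2 if survives(ng)],
--             [ng for ng in ng3 if survives(ng)],
--             [ng for ng in ng4 if survives(ng)])
-- ===== Notes on version B (the rewrite author's own statement) =====
-- stated objective: faster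
-- what changed: Replaces the collect-then-remove double pass (O(N) ToDel list plus O(N^2) repeated list.remove scans) by a single filter that keeps an n-gram iff no sn contains it; A's redundant duplicate appends and quadratic removals disappear.
import Mathlib
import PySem

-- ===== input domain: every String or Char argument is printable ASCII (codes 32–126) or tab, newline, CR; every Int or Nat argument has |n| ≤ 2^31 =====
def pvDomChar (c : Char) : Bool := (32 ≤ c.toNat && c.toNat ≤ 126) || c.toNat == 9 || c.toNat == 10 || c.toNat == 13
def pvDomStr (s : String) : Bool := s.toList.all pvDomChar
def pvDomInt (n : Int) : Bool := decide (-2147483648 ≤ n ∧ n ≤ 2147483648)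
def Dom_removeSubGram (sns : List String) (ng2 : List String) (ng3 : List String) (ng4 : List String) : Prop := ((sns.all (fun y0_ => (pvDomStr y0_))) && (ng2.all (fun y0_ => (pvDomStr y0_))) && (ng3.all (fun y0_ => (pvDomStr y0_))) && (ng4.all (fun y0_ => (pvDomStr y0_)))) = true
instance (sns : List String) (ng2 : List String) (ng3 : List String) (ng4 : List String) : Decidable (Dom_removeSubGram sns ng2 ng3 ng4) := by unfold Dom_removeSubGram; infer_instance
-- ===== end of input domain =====

-- B replaces A's collect-then-remove passes (with its quadratic repeated list.remove) by one
-- filter keeping each n-gram iff no sn contains it; equivalence is about the RETURN value only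
-- (A mutates ng2/ng3/ng4 in place, B builds new lists).


-- ===== PORT A =====
-- 'for sn in sns: for ng in ngX: if ng in sn: ToDelX.append(ng)'
def pvCollect (sns : List String) (ngs : List String) : List String :=
  sns.foldl (fun acc sn =>
    ngs.foldl (fun acc ng => if PySem.Str.isIn ng sn then acc ++ [ng] else acc) acc) []

-- 'for ng in ToDel: if ng in ngs: ngs.remove(ng)'
def pvRemoveLoop (toDel : List String) (ngs : List String) : List String :=
  toDel.foldl (fun cur ng =>
    if cur.contains ng then (PySem.List.remove? cur ng).getD cur else cur) ngs

def removeSubGram (sns : List String) (ng2 : List String) (ng3 : List String) (ng4 : List String) : List String × List String × List String × List String :=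
  let toDel2 := pvCollect sns ng2
  let toDel3 := pvCollect sns ng3
  let toDel4 := pvCollect sns ng4
  (sns, pvRemoveLoop toDel2 ng2, pvRemoveLoop toDel3 ng3, pvRemoveLoop toDel4 ng4)

-- ===== PORT B =====
-- 'not any(ng in sn for sn in sns)'
def pvSurvives (sns : List String) (ng : String) : Bool :=
  !(sns.any (fun sn => PySem.Str.isIn ng sn))

def removeSubGram_alt (sns : List String) (ng2 : List String) (ng3 : List String) (ng4 : List String) : List String × List String × List String × List String :=
  (sns, ng2.filter (pvSurvives sns), ng3.filter (pvSurvives sns), ng4.filter (pvSurvives sns))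

-- ===== PRECONDITION & SPEC =====
def Spec_removeSubGram (sns : List String) (ng2 : List String) (ng3 : List String) (ng4 : List String) (out : List String × List String × List String × List String) : Prop := out = removeSubGram_alt sns ng2 ng3 ng4
instance (sns : List String) (ng2 : List String) (ng3 : List String) (ng4 : List String) (out : List String × List String × List String × List String) : Decidable (Spec_removeSubGram sns ng2 ng3 ng4 out) := by unfold Spec_removeSubGram; infer_instance

-- ===== CLAIM (what is proved, stated in full; the proofs are below) =====
def Claim_equal_removeSubGram : Prop := ∀ (sns : List String) (ng2 : List String) (ng3 : List String) (ng4 : List String), Dom_removeSubGram sns ng2 ng3 ng4 → Spec_removeSubGram sns ng2 ng3 ng4 (removeSubGram sns ng2 ng3 ng4)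

-- ===== LEMMAS AND PROOFS =====

theorem pvCollect_eq_flatMap (sns ngs : List String) :
    pvCollect sns ngs = sns.flatMap (fun sn => ngs.filter (fun ng => PySem.Str.isIn ng sn)) := by
  unfold pvCollect
  simp only [PySem.List.foldl_append_if_eq_filter]
  simpa using PySem.List.foldl_append_eq_flatMap
    (fun sn => ngs.filter (fun ng => PySem.Str.isIn ng sn)) sns []

theorem mem_flatMap_sublist {α β : Type} (f : α → List β) {l : List α} {a : α} (h : a ∈ l) :
    (f a).Sublist (l.flatMap f) := by
  obtain ⟨s, t, rfl⟩ := List.mem_iff_append.mp h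
  rw [List.flatMap_append, List.flatMap_cons]
  exact (List.sublist_append_left (f a) (t.flatMap f)).trans
    (List.sublist_append_right (s.flatMap f) (f a ++ t.flatMap f))

theorem count_le_count_collect (sns ngs : List String) (x : String)
    (hx : x ∈ pvCollect sns ngs) :
    ngs.count x ≤ (pvCollect sns ngs).count x := by
  rw [pvCollect_eq_flatMap] at hx ⊢
  obtain ⟨sn, hsn, hxf⟩ := List.mem_flatMap.mp hx
  have hp : PySem.Str.isIn x sn = true := (List.mem_filter.mp hxf).2
  calc ngs.count x = (ngs.filter (fun ng => PySem.Str.isIn ng sn)).count x :=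
        (List.count_filter (p := fun ng => PySem.Str.isIn ng sn) (a := x) (l := ngs) hp).symm
    _ ≤ _ := (mem_flatMap_sublist (fun sn => ngs.filter (fun ng => PySem.Str.isIn ng sn)) hsn).count_le x


theorem mem_collect_iff (sns ngs : List String) (x : String) (hx : x ∈ ngs) :
    x ∈ pvCollect sns ngs ↔ ¬ pvSurvives sns x = true := by
  simp [pvCollect_eq_flatMap, pvSurvives, List.mem_filter, hx]

theorem filter_erase_of_neg {α : Type} [DecidableEq α] (p : α → Bool) (a : α)
    (hpa : p a = false) : ∀ (l : List α), (l.erase a).filter p = l.filter p := by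
  intro l
  induction l with
  | nil => rfl
  | cons b l ih =>
    by_cases hb : b = a
    · subst hb; simp [List.erase_cons_head, hpa]
    · rw [List.erase_cons_tail (by simp [hb])]
      simp only [List.filter_cons, ih]


theorem removeLoop_eq_filter : ∀ (toDel : List String) (l : List String),
    (∀ x ∈ toDel, l.count x ≤ toDel.count x) →
    pvRemoveLoop toDel l = l.filter (fun x => !toDel.contains x) := by
  intro toDel
  induction toDel with
  | nil => intro l _; simp [pvRemoveLoop]
  | cons a t ih =>
    intro l H
    have step : pvRemoveLoop (a :: t) l =
        pvRemoveLoop t (if l.contains a then ((PySem.List.remove? l a).getD l) else l) := by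
      simp [pvRemoveLoop]
    by_cases ha : a ∈ l
    · have hrem : (PySem.List.remove? l a) = some (l.erase a) :=
        PySem.List.remove?_eq_some_erase l a ha
      rw [step, if_pos (by simpa using ha), hrem]
      simp only [Option.getD_some]
      have hcnt : ∀ x ∈ t, (l.erase a).count x ≤ t.count x := by
        intro x hxt
        by_cases hxa : x = a
        · subst hxa
          have := H x (by simp)
          rw [List.count_erase_self]
          simp [List.count_cons_self] at this
          omega
        · rw [List.count_erase_of_ne hxa]
          have := H x (by simp [hxt])
          simpa [List.count_cons, Ne.symm hxa] using this
      rw [ih _ hcnt]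
      -- now align the two filters
      by_cases hat : a ∈ t
      · have : (l.erase a).filter (fun x => !t.contains x)
            = (l.erase a).filter (fun x => !(a :: t).contains x) := by
          apply List.filter_congr
          intro x _
          by_cases hxa : x = a
          · subst hxa; simp [hat]
          · simp [hxa]
        rw [this, filter_erase_of_neg _ a (by simp)]
      · have hcount1 : l.count a = 1 := by
          have h1 := H a (by simp)
          have h2 : t.count a = 0 := List.count_eq_zero.mpr hat
          have h3 : 1 ≤ l.count a := List.one_le_count_iff.mpr ha
          simp [List.count_cons_self, h2] at h1
          omega
        have hnot : a ∉ l.erase a := by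
          intro hmem
          have := List.count_erase_self (a := a) (l := l)
          have h1 : 1 ≤ (l.erase a).count a := List.one_le_count_iff.mpr hmem
          omega
        have : (l.erase a).filter (fun x => !t.contains x)
            = (l.erase a).filter (fun x => !(a :: t).contains x) := by
          apply List.filter_congr
          intro x hxm
          by_cases hxa : x = a
          · exact absurd (hxa ▸ hxm) hnot
          · simp [hxa]
        rw [this, filter_erase_of_neg _ a (by simp)]
    · rw [step, if_neg (by simpa using ha)]
      have hcnt : ∀ x ∈ t, l.count x ≤ t.count x := by
        intro x hxt
        by_cases hxa : x = a
        · subst hxa; simp [List.count_eq_zero.mpr ha]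
        · have := H x (by simp [hxt])
          simpa [List.count_cons, Ne.symm hxa] using this
      rw [ih _ hcnt]
      apply List.filter_congr
      intro x hxm
      by_cases hxa : x = a
      · exact absurd (hxa ▸ hxm) ha
      · simp [hxa]

theorem removeLoop_collect (sns ngs : List String) :
    pvRemoveLoop (pvCollect sns ngs) ngs = ngs.filter (pvSurvives sns) := by
  rw [removeLoop_eq_filter _ _ (fun x hx => count_le_count_collect sns ngs x hx)]
  apply List.filter_congr
  intro x hx
  have h := mem_collect_iff sns ngs x hx
  cases hps : pvSurvives sns x
  · have hm : x ∈ pvCollect sns ngs := h.mpr (by simp [hps])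
    simp [hm]
  · have hm : x ∉ pvCollect sns ngs := fun hmem => (h.mp hmem) hps
    simp [hm]

-- ===== VERDICT (by name: the statement is the Claim_ definition above) =====
theorem removeSubGram_spec : Claim_equal_removeSubGram := by
  intro sns ng2 ng3 ng4 _
  show _ = _
  simp [removeSubGram, removeSubGram_alt, removeLoop_collect]
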